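-- pv_equiv track=rewrite | github.com/CPJKU/accompanion | accompanion/visualization/midi_helper.py | group_chords_exactly
-- ===== SOURCE A (Python) =====
-- def group_chords_exactly(frame, remainder=[]):
--     if len(frame) == 0:
--         return [], []
--
--     frames = [[frame[0]]]
--
--     for x in frame[1:]:
--         _, dt = x
--
--         if dt == 0:
--             frames[-1].append(x)
--         else:
--             frames.append([x])
--
--     return frames, []
-- ===== SOURCE B (Python) =====
-- def group_chords_exactly(frame, remainder=[]):
--     # span-based decomposition: peel off the head and its run of dt==0 followers
--     def split_run(xs):
--         i = 0
--         while i < len(xs) and xs[i][1] == 0: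
--             i += 1
--         return xs[:i], xs[i:]
--
--     frames = []
--     rest = frame
--     while rest:
--         head, tail = rest[0], rest[1:]
--         run, rest = split_run(tail)
--         frames.append([head] + run)
--     return frames, []
-- ===== Notes on version B (the rewrite author's own statement) =====
-- stated objective: alternative
-- what changed: Replaces A's append-to-last-group accumulator loop by a span-based scan that repeatedly peels off a head element together with its run of dt==0 followers (takeWhile/dropWhile decomposition).
import Mathlib
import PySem

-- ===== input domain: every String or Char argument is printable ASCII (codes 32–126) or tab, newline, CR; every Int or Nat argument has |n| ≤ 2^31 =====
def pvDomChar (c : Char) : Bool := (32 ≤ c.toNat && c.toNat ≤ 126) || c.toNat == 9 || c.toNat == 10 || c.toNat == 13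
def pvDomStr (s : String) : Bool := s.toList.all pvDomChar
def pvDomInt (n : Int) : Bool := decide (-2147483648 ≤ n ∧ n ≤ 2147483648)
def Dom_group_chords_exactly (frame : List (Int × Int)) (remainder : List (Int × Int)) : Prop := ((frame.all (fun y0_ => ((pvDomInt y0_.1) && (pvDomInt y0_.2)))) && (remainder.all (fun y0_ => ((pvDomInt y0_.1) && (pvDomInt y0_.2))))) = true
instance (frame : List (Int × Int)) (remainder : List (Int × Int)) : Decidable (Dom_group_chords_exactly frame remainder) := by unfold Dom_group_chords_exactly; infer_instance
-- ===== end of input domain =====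

-- B replaces A's append-to-last-group accumulator loop by a span-based scan (head + run of dt==0 followers); alternative decomposition, same cost.

-- ===== PORT A =====
-- A's loop body: dt == 0 appends x to the last group, else starts a new group.
def pvStepA (frames : List (List (Int × Int))) (x : Int × Int) : List (List (Int × Int)) :=
  if x.2 == 0 then frames.dropLast ++ [(frames.getLast?.getD []) ++ [x]]
  else frames ++ [[x]]

def group_chords_exactly (frame : List (Int × Int)) (remainder : List (Int × Int)) : (List (List (Int × Int))) × (List (Int × Int)) :=
  match frame with
  | [] => ([], [])
  | f0 :: rest => (rest.foldl pvStepA [[f0]], [])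

-- ===== PORT B =====
-- split_run = span on dt==0; the while loop becomes structural recursion peeling one group per step.
def pvGoB : List (Int × Int) → List (List (Int × Int))
  | [] => []
  | x :: xs =>
      ([x] ++ xs.takeWhile (fun p => p.2 == 0)) :: pvGoB (xs.dropWhile (fun p => p.2 == 0))
termination_by xs => xs.length
decreasing_by
  simpa using Nat.lt_succ_of_le (List.length_dropWhile_le _ _)

def group_chords_exactly_alt (frame : List (Int × Int)) (remainder : List (Int × Int)) : (List (List (Int × Int))) × (List (Int × Int)) :=
  (pvGoB frame, [])

-- ===== PRECONDITION & SPEC =====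
def Spec_group_chords_exactly (frame : List (Int × Int)) (remainder : List (Int × Int)) (out : (List (List (Int × Int))) × (List (Int × Int))) : Prop := out = group_chords_exactly_alt frame remainder
instance (frame : List (Int × Int)) (remainder : List (Int × Int)) (out : (List (List (Int × Int))) × (List (Int × Int))) : Decidable (Spec_group_chords_exactly frame remainder out) := by unfold Spec_group_chords_exactly; infer_instance

-- ===== CLAIM (what is proved, stated in full; the proofs are below) =====
def Claim_equal_group_chords_exactly : Prop := ∀ (frame : List (Int × Int)) (remainder : List (Int × Int)), Dom_group_chords_exactly frame remainder → Spec_group_chords_exactly frame remainder (group_chords_exactly frame remainder)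

-- ===== LEMMAS AND PROOFS =====
-- A's foldl, started on done ++ [cur], extends cur by the leading dt==0 run and then behaves like B's scan.
lemma foldl_pvStepA (xs : List (Int × Int)) :
    ∀ (done : List (List (Int × Int))) (cur : List (Int × Int)),
      xs.foldl pvStepA (done ++ [cur]) =
        done ++ (cur ++ xs.takeWhile (fun p => p.2 == 0)) :: pvGoB (xs.dropWhile (fun p => p.2 == 0)) := by
  induction xs with
  | nil => intro done cur; simp [pvGoB]
  | cons x xs ih =>
      intro done cur
      by_cases h : x.2 = 0
      · have hstep : pvStepA (done ++ [cur]) x = done ++ [cur ++ [x]] := by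
          simp [pvStepA, h]
        simp only [List.foldl_cons, hstep, ih done (cur ++ [x]),
          List.takeWhile_cons, List.dropWhile_cons, h]
        simp
      · have hstep : pvStepA (done ++ [cur]) x = (done ++ [cur]) ++ [[x]] := by
          simp [pvStepA, h]
        simp only [List.foldl_cons, hstep, ih (done ++ [cur]) [x],
          List.takeWhile_cons, List.dropWhile_cons, h]
        simp [pvGoB, h]

-- ===== VERDICT (by name: the statement is the Claim_ definition above) =====
theorem group_chords_exactly_spec : Claim_equal_group_chords_exactly := by
  intro frame remainder _
  unfold Spec_group_chords_exactly group_chords_exactly group_chords_exactly_alt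
  cases frame with
  | nil => simp [pvGoB]
  | cons f0 rest =>
      have := foldl_pvStepA rest [] [f0]
      simp only [List.nil_append] at this
      simp [this, pvGoB]
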